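-- pv_equiv track=rewrite | github.com/gurkirt20-2-2004/LABTEST | M.PY | conj
-- ===== SOURCE A (Python) =====
-- def conj(vc, threshold=120, duration=15):
--     conge = []
--     cnt = 0
--     for i in range(len(vc)):
--         if vc[i] > threshold:
--             cnt += 1
--             if cnt >= duration:
--                 conge.append(i)  # Fixed typo here (from eppend to append)
--         else:
--             cnt = 0
--     return conge
-- ===== SOURCE B (Python) =====
-- def conj(vc, threshold=120, duration=15):
--     res = []
--     n = len(vc)
--     i = 0
--     while i < n:
--         if vc[i] > threshold:
--             s = i
--             while i < n and vc[i] > threshold: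
--                 i += 1
--             e = i - 1
--             if e - s + 1 >= duration:
--                 res.extend(range(s + max(duration - 1, 0), e + 1))
--         else:
--             i += 1
--     return res
-- ===== Notes on version B (the rewrite author's own statement) =====
-- stated objective: alternative
-- what changed: Replaced the per-element running counter with detection of maximal runs above the threshold, each completed run emitting one contiguous index interval range(s+max(duration-1,0), e+1).
import Mathlib
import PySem

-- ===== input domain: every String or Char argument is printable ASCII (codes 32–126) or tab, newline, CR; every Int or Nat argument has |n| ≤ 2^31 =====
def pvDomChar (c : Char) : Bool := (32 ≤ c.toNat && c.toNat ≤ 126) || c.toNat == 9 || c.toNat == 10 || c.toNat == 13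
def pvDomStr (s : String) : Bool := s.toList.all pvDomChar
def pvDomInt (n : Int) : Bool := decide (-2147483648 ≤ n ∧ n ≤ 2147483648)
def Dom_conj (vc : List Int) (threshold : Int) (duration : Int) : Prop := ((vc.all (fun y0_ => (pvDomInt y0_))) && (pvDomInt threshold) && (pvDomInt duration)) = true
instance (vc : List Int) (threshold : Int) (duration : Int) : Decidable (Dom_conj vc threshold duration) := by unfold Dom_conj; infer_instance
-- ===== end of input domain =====

-- B replaces A's per-element running counter with run-boundary detection that emits one
-- index interval per maximal run above the threshold (objective: alternative decomposition).

-- ===== PORT A =====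
-- the for-loop over range(len(vc)) as structural recursion over vc with index i and counter cnt
def conjGo (threshold duration : Int) : List Int → Int → List Int → Int → List Int
  | [], _, conge, _ => conge
  | x :: xs, i, conge, cnt =>
    if x > threshold then
      conjGo threshold duration xs (i + 1)
        (if cnt + 1 ≥ duration then conge ++ [i] else conge) (cnt + 1)
    else
      conjGo threshold duration xs (i + 1) conge 0

def conj (vc : List Int) (threshold : Int) (duration : Int) : List Int :=
  conjGo threshold duration vc 0 [] 0

-- ===== PORT B =====
-- length of the inner while loop's run: leading elements > threshold
def runLen (threshold : Int) : List Int → Nat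
  | [] => 0
  | x :: xs => if x > threshold then runLen threshold xs + 1 else 0

def altGo (threshold duration : Int) : List Int → Int → List Int
  | [], _ => []
  | x :: xs, i =>
    if x > threshold then
      let L : Nat := runLen threshold xs + 1
      (if (L : Int) ≥ duration then
          PySem.List.pyRange (i + max (duration - 1) 0) (i + L) 1
        else []) ++ altGo threshold duration (xs.drop (L - 1)) (i + L)
    else
      altGo threshold duration xs (i + 1)
termination_by xs _ => xs.length
decreasing_by
  all_goals
    simp only [List.length_cons]
    have h1 : (xs.drop (runLen threshold xs + 1 - 1)).length = xs.length - (runLen threshold xs + 1 - 1) :=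
      List.length_drop
    omega

def conj_alt (vc : List Int) (threshold : Int) (duration : Int) : List Int :=
  altGo threshold duration vc 0

-- ===== PRECONDITION & SPEC =====
def Spec_conj (vc : List Int) (threshold : Int) (duration : Int) (out : List Int) : Prop := out = conj_alt vc threshold duration
instance (vc : List Int) (threshold : Int) (duration : Int) (out : List Int) : Decidable (Spec_conj vc threshold duration out) := by unfold Spec_conj; infer_instance

-- ===== CLAIM (what is proved, stated in full; the proofs are below) =====
def Claim_equal_conj : Prop := ∀ (vc : List Int) (threshold : Int) (duration : Int), Dom_conj vc threshold duration → Spec_conj vc threshold duration (conj vc threshold duration)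

-- ===== LEMMAS AND PROOFS =====

theorem runLen_le_length (t : Int) (xs : List Int) : runLen t xs ≤ xs.length := by
  induction xs with
  | nil => simp [runLen]
  | cons a as ih => simp only [runLen, List.length_cons]; split <;> omega

theorem take_runLen_gt (t : Int) (xs : List Int) :
    ∀ y ∈ xs.take (runLen t xs), y > t := by
  induction xs with
  | nil => simp
  | cons x xs ih =>
    simp only [runLen]
    split
    · intro y hy
      simp only [List.take_succ_cons, List.mem_cons] at hy
      rcases hy with rfl | hy
      · assumption
      · exact ih y hy
    · simp

theorem drop_runLen_head (t : Int) (xs : List Int) :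
    xs.drop (runLen t xs) = [] ∨
      ∃ y ys, xs.drop (runLen t xs) = y :: ys ∧ ¬ y > t := by
  induction xs with
  | nil => left; rfl
  | cons x xs ih =>
    simp only [runLen]
    split
    · simpa using ih
    · right; exact ⟨x, xs, rfl, by assumption⟩

-- running A over a fully-above-threshold prefix ys appends exactly the interval of indices
-- whose running count reaches duration
theorem conjGo_run (t d : Int) (ys : List Int) (h : ∀ y ∈ ys, y > t) :
    ∀ (rest : List Int) (i : Int) (acc : List Int) (cnt : Int),
    conjGo t d (ys ++ rest) i acc cnt =
      conjGo t d rest (i + ys.length)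
        (acc ++ PySem.List.pyRange (i + max (d - cnt - 1) 0) (i + ys.length) 1)
        (cnt + ys.length) := by
  induction ys with
  | nil =>
    intro rest i acc cnt
    simp only [List.nil_append, List.length_nil, Int.natCast_zero, add_zero]
    rw [PySem.List.pyRange_one_eq_nil (by omega)]
    simp
  | cons y ys ih =>
    intro rest i acc cnt
    have hy : y > t := h y (List.mem_cons_self ..)
    have hys : ∀ z ∈ ys, z > t := fun z hz => h z (List.mem_cons_of_mem _ hz)
    simp only [List.cons_append, conjGo, if_pos hy]
    rw [ih hys]
    have harg :
        (if cnt + 1 ≥ d then acc ++ [i] else acc) ++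
          PySem.List.pyRange (i + 1 + max (d - (cnt + 1) - 1) 0) (i + 1 + (ys.length : Int)) 1
        = acc ++ PySem.List.pyRange (i + max (d - cnt - 1) 0) (i + ((y :: ys).length : Int)) 1 := by
      by_cases hc : cnt + 1 ≥ d
      · rw [if_pos hc]
        have h1 : i + 1 + max (d - (cnt + 1) - 1) 0 = i + 1 := by omega
        have h2 : i + max (d - cnt - 1) 0 = i := by omega
        have h3 : (i : Int) < i + ((y :: ys).length : Int) := by
          simp only [List.length_cons]; push_cast; omega
        rw [h1, h2, PySem.List.pyRange_one_cons h3]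
        simp only [List.length_cons, List.append_assoc, List.singleton_append]
        push_cast
        ring_nf
      · rw [if_neg hc]
        have h1 : i + 1 + max (d - (cnt + 1) - 1) 0 = i + max (d - cnt - 1) 0 := by omega
        rw [h1]
        simp only [List.length_cons]
        push_cast
        ring_nf
    rw [harg]
    have h4 : i + 1 + (ys.length : Int) = i + ((y :: ys).length : Int) := by
      simp only [List.length_cons]; push_cast; ring
    rw [h4]
    have h5 : cnt + 1 + (ys.length : Int) = cnt + ((y :: ys).length : Int) := by
      simp only [List.length_cons]; push_cast; ring
    rw [h5]

theorem conjGo_eq_altGo (t d : Int) (xs : List Int) (i : Int) (acc : List Int) :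
    conjGo t d xs i acc 0 = acc ++ altGo t d xs i := by
  match xs with
  | [] => simp [conjGo, altGo]
  | x :: xs =>
    by_cases hx : x > t
    · have hsplit : x :: xs = (x :: xs.take (runLen t xs)) ++ xs.drop (runLen t xs) := by
        simp
      have hrun : ∀ y ∈ x :: xs.take (runLen t xs), y > t := by
        intro y hy
        rcases List.mem_cons.mp hy with rfl | hy
        · exact hx
        · exact take_runLen_gt t xs y hy
      have hle := runLen_le_length t xs
      have hlen : ((x :: xs.take (runLen t xs)).length : Int) = ((runLen t xs + 1 : Nat) : Int) := by
        simp only [List.length_cons, List.length_take]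
        push_cast; omega
      have hB : altGo t d (x :: xs) i =
          (if ((runLen t xs + 1 : Nat) : Int) ≥ d then
              PySem.List.pyRange (i + max (d - 1) 0) (i + ((runLen t xs + 1 : Nat) : Int)) 1
            else []) ++
            altGo t d (xs.drop (runLen t xs + 1 - 1)) (i + ((runLen t xs + 1 : Nat) : Int)) := by
        rw [altGo]; simp only [if_pos hx]
      have hA := conjGo_run t d (x :: xs.take (runLen t xs)) hrun (xs.drop (runLen t xs)) i acc 0
      rw [hlen] at hA
      have hemit :
          PySem.List.pyRange (i + max (d - 0 - 1) 0) (i + ((runLen t xs + 1 : Nat) : Int)) 1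
            = (if ((runLen t xs + 1 : Nat) : Int) ≥ d then
                PySem.List.pyRange (i + max (d - 1) 0) (i + ((runLen t xs + 1 : Nat) : Int)) 1
              else []) := by
        by_cases hc : ((runLen t xs + 1 : Nat) : Int) ≥ d
        · rw [if_pos hc]; norm_num
        · rw [if_neg hc]
          exact PySem.List.pyRange_one_eq_nil (by omega)
      conv_lhs => rw [hsplit]
      rw [hA, hB]
      simp only [Nat.add_sub_cancel]
      rcases drop_runLen_head t xs with hnil | ⟨y, ys, heq, hy⟩
      · rw [hnil]
        simp only [conjGo, altGo, List.append_nil, hemit]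
      · rw [heq]
        have hys_lt : ys.length < (x :: xs).length := by
          have h1 : (xs.drop (runLen t xs)).length = xs.length - runLen t xs :=
            List.length_drop
          rw [heq] at h1
          simp only [List.length_cons] at h1 ⊢
          omega
        simp only [conjGo, if_neg hy]
        rw [conjGo_eq_altGo t d ys (i + ((runLen t xs + 1 : Nat) : Int) + 1) _]
        rw [show altGo t d (y :: ys) (i + ((runLen t xs + 1 : Nat) : Int)) =
              altGo t d ys (i + ((runLen t xs + 1 : Nat) : Int) + 1) from by
          rw [altGo]; simp only [if_neg hy]]
        rw [hemit]
        simp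
    · simp only [conjGo, if_neg hx]
      rw [conjGo_eq_altGo t d xs (i + 1) acc]
      conv_rhs => rw [show altGo t d (x :: xs) i = altGo t d xs (i + 1) from by
        rw [altGo]; simp only [if_neg hx]]
termination_by xs.length
decreasing_by
  · exact hys_lt
  · simp only [List.length_cons]; omega

-- ===== VERDICT (by name: the statement is the Claim_ definition above) =====
theorem conj_spec : Claim_equal_conj := by
  intro vc threshold duration _
  unfold Spec_conj conj conj_alt
  simpa using conjGo_eq_altGo threshold duration vc 0 []
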